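-- pv_equiv track=rewrite | github.com/Yangjiaxi/CoE | data_prepare/prepare_tagged_tulu.py | left_shrink
-- ===== SOURCE A (Python) =====
-- def left_shrink(value, permitted):
--     if ":" not in value:
--         return False, ""
--     while value.split(":", 1)[0].strip().lower() not in permitted:
--         if ":" not in value:
--             return False, value
--         value = value.split(":", 1)[-1].strip()
--     return True, value
-- ===== SOURCE B (Python) =====
-- def left_shrink(value, permitted):
--     if ":" not in value:
--         return False, ""
--     allowed = set(permitted)
--     parts = value.split(":")
--     for k, part in enumerate(parts):
--         if part.strip().lower() in allowed:
--             if k == 0: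
--                 return True, value
--             return True, ":".join(parts[k:]).strip()
--     return False, parts[-1].strip()
-- ===== Notes on version B (the rewrite author's own statement) =====
-- stated objective: alternative
-- what changed: A repeatedly re-splits and re-strips the shrinking string (one split/strip pair per colon); B splits the string into colon-separated segments once and makes a single left-to-right scan over them against a set built from permitted, joining the surviving suffix once at the end.
import Mathlib
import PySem

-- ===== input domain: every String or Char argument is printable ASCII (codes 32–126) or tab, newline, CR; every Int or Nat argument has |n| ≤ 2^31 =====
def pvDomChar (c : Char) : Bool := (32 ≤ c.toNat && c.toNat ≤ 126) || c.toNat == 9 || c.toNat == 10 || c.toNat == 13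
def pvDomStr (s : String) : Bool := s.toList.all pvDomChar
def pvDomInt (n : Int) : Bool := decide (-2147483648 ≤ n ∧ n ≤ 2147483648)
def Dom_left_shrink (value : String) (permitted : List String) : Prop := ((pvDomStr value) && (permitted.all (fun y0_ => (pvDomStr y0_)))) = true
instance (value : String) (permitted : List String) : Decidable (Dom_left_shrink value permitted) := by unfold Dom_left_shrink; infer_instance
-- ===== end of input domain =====

-- B replaces A's re-split/re-strip while-loop by one split of the string into
-- colon-separated segments and a single left-to-right scan against a set (objective: alternative).

-- ===== PORT A =====
-- helper lemmas needed by the port's termination argument (cited in decreasing_by)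

lemma pv_go1_m0 : ∀ (fuel : Nat) (l cur : List Char) (acc : List (List Char)),
    PySem.Chars.splitOnMax.go [':'] fuel 0 l cur acc = acc.reverse ++ [cur.reverse ++ l] := by
  intro fuel l cur acc
  cases fuel <;> cases l <;> simp [PySem.Chars.splitOnMax.go]

lemma pv_go1_spec : ∀ (fuel : Nat) (l cur : List Char) (acc : List (List Char)), l.length < fuel →
    PySem.Chars.splitOnMax.go [':'] fuel 1 l cur acc =
      acc.reverse ++ [cur.reverse ++ l.takeWhile (· ≠ ':')] ++
        (if ':' ∈ l then [(l.dropWhile (· ≠ ':')).tail] else []) := by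
  intro fuel
  induction fuel with
  | zero => intro l cur acc h; omega
  | succ f ih =>
    intro l cur acc h
    cases l with
    | nil => simp [PySem.Chars.splitOnMax.go]
    | cons c rest =>
      by_cases hc : c = ':'
      · subst hc
        simp [PySem.Chars.splitOnMax.go, List.isPrefixOf, pv_go1_m0]
      · have hpre : [':'].isPrefixOf (c :: rest) = false := by
          simp [List.isPrefixOf]; exact fun hh => (hc hh.symm).elim
        simp only [PySem.Chars.splitOnMax.go, hpre]
        rw [if_neg (by omega : ¬ (1 = 0))]
        simp only [Bool.false_eq_true, if_false]
        rw [ih rest (c :: cur) acc (by simpa using Nat.lt_of_succ_lt_succ h)]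
        simp [hc, List.mem_cons, Ne.symm hc]

lemma pv_splitOnMax1 (l : List Char) :
    PySem.Chars.splitOnMax l [':'] 1 =
      [l.takeWhile (· ≠ ':')] ++ (if ':' ∈ l then [(l.dropWhile (· ≠ ':')).tail] else []) := by
  rw [PySem.Chars.splitOnMax]
  rw [if_neg (by omega : ¬ ((1:Int) < 0))]
  have h1 : (1:Int).toNat = 1 := rfl
  rw [h1, pv_go1_spec (l.length + 1) l [] [] (by omega)]
  simp

lemma pv_isIn_colon (l : List Char) : PySem.Chars.isIn [':'] l = true ↔ ':' ∈ l := by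
  rw [PySem.Chars.isIn_iff_infix]
  constructor
  · intro h; exact h.mem (by simp)
  · intro h
    obtain ⟨a, b, rfl⟩ := List.mem_iff_append.mp h
    exact ⟨a, b, by simp⟩

lemma pv_strip_sublist (l : List Char) : List.Sublist (PySem.Chars.strip l) l := by
  unfold PySem.Chars.strip PySem.Chars.rstrip PySem.Chars.lstrip
  have h1 : List.Sublist
      ((List.dropWhile PySem.Chars.isspace (List.dropWhile PySem.Chars.isspace l).reverse).reverse)
      (List.dropWhile PySem.Chars.isspace l) := by
    have h2 := List.reverse_sublist.mpr
      (List.dropWhile_sublist (p := PySem.Chars.isspace) (l := (List.dropWhile PySem.Chars.isspace l).reverse))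
    simpa using h2
  exact h1.trans (List.dropWhile_sublist _)

lemma pv_shrink_lt (v : List Char) (h : PySem.Chars.isIn [':'] v = true) :
    (PySem.Chars.strip ((PySem.Chars.splitOnMax v [':'] 1).getLastD [])).length < v.length := by
  have hm : ':' ∈ v := (pv_isIn_colon v).mp h
  rw [pv_splitOnMax1, if_pos hm]
  have hlen : (PySem.Chars.strip ((v.dropWhile (· ≠ ':')).tail)).length ≤ ((v.dropWhile (· ≠ ':')).tail).length :=
    (pv_strip_sublist _).length_le
  have hne : v.dropWhile (· ≠ ':') ≠ [] := by
    intro hnil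
    have := List.dropWhile_eq_nil_iff.mp hnil
    simp at this
    exact (this ':' hm) rfl
  have h1 : ((v.dropWhile (· ≠ ':')).tail).length < (v.dropWhile (· ≠ ':')).length := by
    cases hd : v.dropWhile (· ≠ ':') with
    | nil => exact absurd hd hne
    | cons x xs => simp
  have h2 : (v.dropWhile (· ≠ ':')).length ≤ v.length := (List.dropWhile_sublist _).length_le
  simp only [List.getLastD_concat]
  omega

def leftShrinkGoA (perm : List (List Char)) (v : List Char) : Bool × List Char :=
  if PySem.Chars.lower (PySem.Chars.strip ((PySem.Chars.splitOnMax v [':'] 1).headD [])) ∈ perm then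
    (true, v)
  else if hc : PySem.Chars.isIn [':'] v = false then
    (false, v)
  else
    leftShrinkGoA perm (PySem.Chars.strip ((PySem.Chars.splitOnMax v [':'] 1).getLastD []))
termination_by v.length
decreasing_by exact pv_shrink_lt v (by simpa using hc)

def left_shrink (value : String) (permitted : List String) : Bool × String :=
  if PySem.Str.isIn ":" value = false then
    (false, "")
  else
    let r := leftShrinkGoA (permitted.map String.toList) value.toList
    (r.1, String.mk r.2)

-- ===== PORT B =====
def leftShrinkGoB (allowed : PySem.Set (List Char)) (value : List Char)
    (parts : List (List Char)) (k : Nat) (rest : List (List Char)) : Bool × List Char :=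
  match rest with
  | [] => (false, PySem.Chars.strip (parts.getLastD []))
  | p :: rs =>
    if allowed.contains (PySem.Chars.lower (PySem.Chars.strip p)) then
      if k = 0 then (true, value)
      else (true, PySem.Chars.strip (PySem.Chars.join [':'] (parts.drop k)))
    else leftShrinkGoB allowed value parts (k + 1) rs

def left_shrink_alt (value : String) (permitted : List String) : Bool × String :=
  if PySem.Str.isIn ":" value = false then
    (false, "")
  else
    let parts := PySem.Chars.splitOn value.toList [':']
    let r := leftShrinkGoB (PySem.Set.ofList (permitted.map String.toList)) value.toList parts 0 parts
    (r.1, String.mk r.2)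

-- ===== PRECONDITION & SPEC =====
def Spec_left_shrink (value : String) (permitted : List String) (out : Bool × String) : Prop := out = left_shrink_alt value permitted
instance (value : String) (permitted : List String) (out : Bool × String) : Decidable (Spec_left_shrink value permitted out) := by unfold Spec_left_shrink; infer_instance

-- ===== CLAIM (what is proved, stated in full; the proofs are below) =====
def Claim_equal_left_shrink : Prop := ∀ (value : String) (permitted : List String), Dom_left_shrink value permitted → Spec_left_shrink value permitted (left_shrink value permitted)

-- ===== LEMMAS AND PROOFS =====

-- spec split on ':' used only by the proofs
def pvSplitc : List Char → List (List Char)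
  | [] => [[]]
  | c :: r => if c = ':' then [] :: pvSplitc r else (pvSplitc r).modifyHead (c :: ·)

lemma pvSplitc_ne_nil (l : List Char) : pvSplitc l ≠ [] := by
  induction l with
  | nil => simp [pvSplitc]
  | cons c r ih =>
    by_cases hc : c = ':' <;> simp [pvSplitc, hc]
    exact ih

lemma pvSplitc_colonfree (l : List Char) : ∀ p ∈ pvSplitc l, ':' ∉ p := by
  induction l with
  | nil => simp [pvSplitc]
  | cons c r ih =>
    by_cases hc : c = ':'
    · subst hc; simp [pvSplitc]; exact ih
    · intro p hp
      rw [pvSplitc, if_neg hc] at hp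
      cases hps : pvSplitc r with
      | nil => exact absurd hps (pvSplitc_ne_nil r)
      | cons q qs =>
        rw [hps] at hp
        simp at hp
        rcases hp with rfl | hp
        · intro hm
          rcases List.mem_cons.mp hm with rfl | hm
          · exact hc rfl
          · exact ih q (hps ▸ List.mem_cons_self) hm
        · exact ih p (hps ▸ List.mem_cons_of_mem _ hp)

lemma pv_join_splitc (l : List Char) : PySem.Chars.join [':'] (pvSplitc l) = l := by
  induction l with
  | nil => rfl
  | cons c r ih =>
    by_cases hc : c = ':'
    · subst hc
      rw [pvSplitc, if_pos rfl]
      cases hps : pvSplitc r with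
      | nil => exact absurd hps (pvSplitc_ne_nil r)
      | cons q qs =>
        rw [hps] at ih
        rw [PySem.Chars.join_cons_cons, ih]
        rfl
    · rw [pvSplitc, if_neg hc]
      cases hps : pvSplitc r with
      | nil => exact absurd hps (pvSplitc_ne_nil r)
      | cons q qs =>
        rw [hps] at ih
        cases qs with
        | nil =>
          rw [PySem.Chars.join_singleton] at ih
          simp [PySem.Chars.join_singleton, ih]
        | cons q2 t =>
          rw [PySem.Chars.join_cons_cons] at ih
          simp only [List.modifyHead_cons, PySem.Chars.join_cons_cons, ← ih]
          simp

lemma pvSplitc_cons_of_mem (l : List Char) (h : ':' ∈ l) :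
    pvSplitc l = l.takeWhile (· ≠ ':') :: pvSplitc ((l.dropWhile (· ≠ ':')).tail) := by
  induction l with
  | nil => simp at h
  | cons c r ih =>
    by_cases hc : c = ':'
    · subst hc; simp [pvSplitc, List.takeWhile_cons, List.dropWhile_cons]
    · have hr : ':' ∈ r := by
        rcases List.mem_cons.mp h with h1 | hm
        · exact absurd h1.symm hc
        · exact hm
      rw [pvSplitc, if_neg hc, ih hr]
      simp [List.takeWhile_cons, List.dropWhile_cons, hc, Ne.symm hc]

lemma pv_splitOn_go_spec : ∀ (fuel : Nat) (l cur : List Char) (acc : List (List Char)), l.length < fuel →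
    PySem.Chars.splitOn.go [':'] fuel l cur acc =
      acc.reverse ++ (pvSplitc l).modifyHead (cur.reverse ++ ·) := by
  intro fuel
  induction fuel with
  | zero => intro l cur acc h; omega
  | succ f ih =>
    intro l cur acc h
    cases l with
    | nil => simp [PySem.Chars.splitOn.go, pvSplitc]
    | cons c rest =>
      by_cases hc : c = ':'
      · subst hc
        have hpre : [':'].isPrefixOf (':' :: rest) = true := by simp [List.isPrefixOf]
        simp only [PySem.Chars.splitOn.go, hpre, if_pos, List.length_cons, List.length_nil,
          List.drop_succ_cons, List.drop_zero]
        rw [ih rest [] (cur.reverse :: acc) (by simpa using Nat.lt_of_succ_lt_succ h)]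
        rw [pvSplitc, if_pos rfl]
        cases hps : pvSplitc rest with
        | nil => exact absurd hps (pvSplitc_ne_nil rest)
        | cons q qs => simp
      · have hpre : [':'].isPrefixOf (c :: rest) = false := by
          simp [List.isPrefixOf]; exact fun hh => (hc hh.symm).elim
        simp only [PySem.Chars.splitOn.go, hpre, Bool.false_eq_true, if_false]
        rw [ih rest (c :: cur) acc (by simpa using Nat.lt_of_succ_lt_succ h)]
        rw [pvSplitc, if_neg hc]
        cases hps : pvSplitc rest with
        | nil => exact absurd hps (pvSplitc_ne_nil rest)
        | cons q qs => simp

lemma pv_splitOn_eq (l : List Char) : PySem.Chars.splitOn l [':'] = pvSplitc l := by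
  rw [PySem.Chars.splitOn, pv_splitOn_go_spec (l.length + 1) l [] [] (by omega)]
  cases hps : pvSplitc l with
  | nil => exact absurd hps (pvSplitc_ne_nil l)
  | cons q qs => simp

-- whitespace lemmas
lemma pv_lstrip_idem (l : List Char) : PySem.Chars.lstrip (PySem.Chars.lstrip l) = PySem.Chars.lstrip l := by
  simp [PySem.Chars.lstrip, List.dropWhile_idempotent]

lemma pv_rstrip_idem (l : List Char) : PySem.Chars.rstrip (PySem.Chars.rstrip l) = PySem.Chars.rstrip l := by
  simp [PySem.Chars.rstrip, List.dropWhile_idempotent]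

lemma pv_rstrip_eq_nil_iff (l : List Char) :
    PySem.Chars.rstrip l = [] ↔ ∀ c ∈ l, PySem.Chars.isspace c = true := by
  simp [PySem.Chars.rstrip, List.dropWhile_eq_nil_iff]

lemma pv_rstrip_cons (c : Char) (t : List Char) :
    PySem.Chars.rstrip (c :: t) =
      if PySem.Chars.rstrip t = [] then (if PySem.Chars.isspace c then [] else [c])
      else c :: PySem.Chars.rstrip t := by
  rw [PySem.Chars.rstrip, List.reverse_cons, List.dropWhile_append]
  by_cases ht : PySem.Chars.rstrip t = []
  · have h0 : List.dropWhile PySem.Chars.isspace t.reverse = [] := by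
      have := (pv_rstrip_eq_nil_iff t).mp ht
      rw [List.dropWhile_eq_nil_iff]
      intro x hx; exact this x (List.mem_reverse.mp hx)
    rw [if_pos ht, h0]
    by_cases hsp : PySem.Chars.isspace c <;> simp [List.dropWhile_cons, hsp]
  · have h0 : (List.dropWhile PySem.Chars.isspace t.reverse).isEmpty = false := by
      rw [List.isEmpty_eq_false_iff]
      intro hnil
      exact ht (by simp [PySem.Chars.rstrip, hnil])
    rw [if_neg ht, h0]
    simp [PySem.Chars.rstrip]

lemma pv_lstrip_rstrip_comm (l : List Char) :
    PySem.Chars.lstrip (PySem.Chars.rstrip l) = PySem.Chars.rstrip (PySem.Chars.lstrip l) := by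
  induction l with
  | nil => rfl
  | cons c t ih =>
    by_cases hsp : PySem.Chars.isspace c
    · have hl : PySem.Chars.lstrip (c :: t) = PySem.Chars.lstrip t := by
        simp [PySem.Chars.lstrip, List.dropWhile_cons, hsp]
      rw [hl, pv_rstrip_cons, ← ih]
      by_cases ht : PySem.Chars.rstrip t = []
      · rw [if_pos ht, ht]
        all_goals simp [hsp]
      · rw [if_neg ht]
        cases hrt : PySem.Chars.rstrip t with
        | nil => exact absurd hrt ht
        | cons d u =>
          simp [PySem.Chars.lstrip, List.dropWhile_cons, hsp]
    · have hl : PySem.Chars.lstrip (c :: t) = c :: t := by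
        simp [PySem.Chars.lstrip, List.dropWhile_cons, hsp]
      rw [hl, pv_rstrip_cons]
      by_cases ht : PySem.Chars.rstrip t = []
      · rw [if_pos ht, if_neg (by simp [hsp])]
        simp [PySem.Chars.lstrip, hsp]
      · rw [if_neg ht]
        cases hrt : PySem.Chars.rstrip t with
        | nil => exact absurd hrt ht
        | cons d u => simp [PySem.Chars.lstrip, List.dropWhile_cons, hsp]

lemma pv_strip_lstrip (l : List Char) : PySem.Chars.strip (PySem.Chars.lstrip l) = PySem.Chars.strip l := by
  simp [PySem.Chars.strip, pv_lstrip_idem]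

lemma pv_strip_rstrip (l : List Char) : PySem.Chars.strip (PySem.Chars.rstrip l) = PySem.Chars.strip l := by
  simp [PySem.Chars.strip, pv_lstrip_rstrip_comm, pv_rstrip_idem]

lemma pv_strip_idem (l : List Char) : PySem.Chars.strip (PySem.Chars.strip l) = PySem.Chars.strip l := by
  simp [PySem.Chars.strip, pv_lstrip_rstrip_comm, pv_rstrip_idem, pv_lstrip_idem]

lemma pv_lstrip_append_colon (a t : List Char) :
    PySem.Chars.lstrip (a ++ ':' :: t) = PySem.Chars.lstrip a ++ ':' :: t := by
  rw [PySem.Chars.lstrip, List.dropWhile_append]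
  by_cases h0 : (List.dropWhile PySem.Chars.isspace a).isEmpty
  · rw [if_pos h0]
    rw [List.isEmpty_iff] at h0
    simp [PySem.Chars.lstrip, h0, List.dropWhile_cons, PySem.Chars.isspace]
  · rw [if_neg h0]
    rfl

lemma pv_rstrip_append_colon (a t : List Char) :
    PySem.Chars.rstrip (a ++ ':' :: t) = a ++ ':' :: PySem.Chars.rstrip t := by
  induction a with
  | nil =>
    simp only [List.nil_append]
    rw [pv_rstrip_cons]
    by_cases ht : PySem.Chars.rstrip t = []
    · rw [if_pos ht, if_neg (by simp [PySem.Chars.isspace]), ht]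
    · rw [if_neg ht]
  | cons c r ih =>
    simp only [List.cons_append]
    rw [pv_rstrip_cons, ih]
    have hne : r ++ ':' :: PySem.Chars.rstrip t ≠ [] := by simp
    rw [if_neg hne]

lemma pv_strip_append_colon (a t : List Char) :
    PySem.Chars.strip (a ++ ':' :: t) = PySem.Chars.lstrip a ++ ':' :: PySem.Chars.rstrip t := by
  rw [PySem.Chars.strip, pv_lstrip_append_colon, pv_rstrip_append_colon]

lemma pv_mem_lstrip {c : Char} {l : List Char} (h : c ∈ PySem.Chars.lstrip l) : c ∈ l :=
  (List.dropWhile_sublist _).mem h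

lemma pv_mem_strip {c : Char} {l : List Char} (h : c ∈ PySem.Chars.strip l) : c ∈ l :=
  (pv_strip_sublist l).mem h

lemma pv_takeWhile_append (a t : List Char) (h : ':' ∉ a) :
    (a ++ ':' :: t).takeWhile (· ≠ ':') = a := by
  induction a with
  | nil => simp [List.takeWhile_cons]
  | cons c r ih =>
    have hc : c ≠ ':' := fun hh => h (hh ▸ List.mem_cons_self)
    have ih' := ih (fun hm => h (List.mem_cons_of_mem _ hm))
    simp only [ne_eq, decide_not] at ih' ⊢
    simp [List.takeWhile_cons, hc, ih']

lemma pv_dropWhile_append (a t : List Char) (h : ':' ∉ a) :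
    (a ++ ':' :: t).dropWhile (· ≠ ':') = ':' :: t := by
  induction a with
  | nil => simp [List.dropWhile_cons]
  | cons c r ih =>
    have hc : c ≠ ':' := fun hh => h (hh ▸ List.mem_cons_self)
    have ih' := ih (fun hm => h (List.mem_cons_of_mem _ hm))
    simp only [ne_eq, decide_not] at ih' ⊢
    simp [List.dropWhile_cons, hc, ih']

-- main loop correspondence
lemma pv_getLastD_of_drop (l : List (List Char)) (k : Nat) (x : List Char)
    (h : l.drop k = [x]) : l.getLastD [] = x := by
  conv_lhs => rw [← List.take_append_drop k l, h]
  exact List.getLastD_concat ..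

lemma pv_isIn_eq_false (l : List Char) (h : ':' ∉ l) : PySem.Chars.isIn [':'] l = false := by
  cases hh : PySem.Chars.isIn [':'] l with
  | false => rfl
  | true => exact absurd ((pv_isIn_colon _).mp hh) h

lemma pv_takeWhile_self (l : List Char) (h : ':' ∉ l) : l.takeWhile (· ≠ ':') = l :=
  List.takeWhile_eq_self_iff.mpr (fun x hx => by
    simp only [ne_eq, decide_eq_true_eq]
    exact fun hh => h (hh ▸ hx))

lemma pv_goB_nil (allowed : PySem.Set (List Char)) (value : List Char)
    (parts : List (List Char)) (k : Nat) :
    leftShrinkGoB allowed value parts k [] = (false, PySem.Chars.strip (parts.getLastD [])) := rfl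

lemma pv_goB_cons (allowed : PySem.Set (List Char)) (value : List Char)
    (parts : List (List Char)) (k : Nat) (p : List Char) (rs : List (List Char)) :
    leftShrinkGoB allowed value parts k (p :: rs) =
      if allowed.contains (PySem.Chars.lower (PySem.Chars.strip p)) then
        if k = 0 then (true, value)
        else (true, PySem.Chars.strip (PySem.Chars.join [':'] (parts.drop k)))
      else leftShrinkGoB allowed value parts (k + 1) rs := rfl

lemma pv_loop_main (perm : List (List Char)) (allowed : PySem.Set (List Char)) (value : List Char)
    (parts : List (List Char)) (hcf : ∀ p ∈ parts, ':' ∉ p)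
    (hmem : ∀ x, allowed.contains x = true ↔ x ∈ perm) :
    ∀ rest k, parts.drop k = rest → rest ≠ [] → 1 ≤ k →
      leftShrinkGoA perm (PySem.Chars.strip (PySem.Chars.join [':'] rest)) =
        leftShrinkGoB allowed value parts k rest := by
  intro rest
  induction rest with
  | nil => intro k _ hne _; exact absurd rfl hne
  | cons r0 rs ih =>
    intro k hdrop _ hk
    have hr0 : r0 ∈ parts := by
      have h1 : r0 ∈ parts.drop k := by rw [hdrop]; exact List.mem_cons_self
      exact List.mem_of_mem_drop h1
    have hr0cf : ':' ∉ r0 := hcf r0 hr0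
    have hk0 : ¬ (k = 0) := by omega
    cases rs with
    | nil =>
      have hnc : ':' ∉ PySem.Chars.strip r0 := fun hm => hr0cf (pv_mem_strip hm)
      have hsplit : PySem.Chars.splitOnMax (PySem.Chars.strip r0) [':'] 1 = [PySem.Chars.strip r0] := by
        rw [pv_splitOnMax1, if_neg hnc, List.append_nil, pv_takeWhile_self _ hnc]
      rw [PySem.Chars.join_singleton, leftShrinkGoA, hsplit, pv_goB_cons]
      simp only [List.headD_cons, pv_strip_idem]
      by_cases hP : PySem.Chars.lower (PySem.Chars.strip r0) ∈ perm
      · have hc : allowed.contains (PySem.Chars.lower (PySem.Chars.strip r0)) = true := (hmem _).mpr hP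
        rw [if_pos hP, hc, if_pos rfl, if_neg hk0, hdrop, PySem.Chars.join_singleton]
      · have hc : allowed.contains (PySem.Chars.lower (PySem.Chars.strip r0)) = false := by
          cases hh : allowed.contains (PySem.Chars.lower (PySem.Chars.strip r0)) with
          | false => rfl
          | true => exact absurd ((hmem _).mp hh) hP
        rw [if_neg hP, dif_pos (pv_isIn_eq_false _ hnc), hc]
        simp only [Bool.false_eq_true, if_false]
        rw [pv_goB_nil, pv_getLastD_of_drop parts k r0 hdrop]
    | cons r1 rs2 =>
      have hV : PySem.Chars.strip (PySem.Chars.join [':'] (r0 :: r1 :: rs2)) =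
          PySem.Chars.lstrip r0 ++ ':' :: PySem.Chars.rstrip (PySem.Chars.join [':'] (r1 :: rs2)) := by
        rw [PySem.Chars.join_cons_cons]
        have : r0 ++ [':'] ++ PySem.Chars.join [':'] (r1 :: rs2) =
            r0 ++ ':' :: PySem.Chars.join [':'] (r1 :: rs2) := by simp
        rw [this, pv_strip_append_colon]
      have hlcf : ':' ∉ PySem.Chars.lstrip r0 := fun hm => hr0cf (pv_mem_lstrip hm)
      have hmemV : ':' ∈ PySem.Chars.strip (PySem.Chars.join [':'] (r0 :: r1 :: rs2)) := by
        rw [hV]; exact List.mem_append_right _ List.mem_cons_self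
      have hsplit : PySem.Chars.splitOnMax
          (PySem.Chars.strip (PySem.Chars.join [':'] (r0 :: r1 :: rs2))) [':'] 1 =
          [PySem.Chars.lstrip r0, PySem.Chars.rstrip (PySem.Chars.join [':'] (r1 :: rs2))] := by
        rw [pv_splitOnMax1, if_pos hmemV, hV, pv_takeWhile_append _ _ hlcf, pv_dropWhile_append _ _ hlcf]
        rfl
      rw [leftShrinkGoA, hsplit, pv_goB_cons]
      simp only [List.headD_cons, pv_strip_lstrip]
      by_cases hP : PySem.Chars.lower (PySem.Chars.strip r0) ∈ perm
      · have hc : allowed.contains (PySem.Chars.lower (PySem.Chars.strip r0)) = true := (hmem _).mpr hP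
        rw [if_pos hP, hc, if_pos rfl, if_neg hk0, hdrop]
      · have hc : allowed.contains (PySem.Chars.lower (PySem.Chars.strip r0)) = false := by
          cases hh : allowed.contains (PySem.Chars.lower (PySem.Chars.strip r0)) with
          | false => rfl
          | true => exact absurd ((hmem _).mp hh) hP
        have hisInV : ¬ (PySem.Chars.isIn [':']
            (PySem.Chars.strip (PySem.Chars.join [':'] (r0 :: r1 :: rs2))) = false) := by
          rw [(pv_isIn_colon _).mpr hmemV]; simp
        rw [if_neg hP, dif_neg hisInV, hc]
        simp only [Bool.false_eq_true, if_false, List.getLastD_cons, List.getLastD_nil]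
        rw [pv_strip_rstrip]
        have hdrop' : parts.drop (k + 1) = r1 :: rs2 := by
          rw [← List.tail_drop, hdrop]; rfl
        exact ih (k + 1) hdrop' (by simp) (by omega)

theorem pv_main (value : String) (permitted : List String) :
    left_shrink value permitted = left_shrink_alt value permitted := by
  by_cases hin : PySem.Str.isIn ":" value = false
  · rw [left_shrink, left_shrink_alt, if_pos hin, if_pos hin]
  · have hmemv : ':' ∈ value.toList := by
      have h1 : PySem.Str.isIn ":" value = true := by
        cases h : PySem.Str.isIn ":" value with
        | false => exact absurd h hin
        | true => rfl
      rw [PySem.Str.isIn_eq] at h1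
      exact (pv_isIn_colon _).mp h1
    rw [left_shrink, left_shrink_alt, if_neg hin, if_neg hin]
    have hgo : leftShrinkGoA (permitted.map String.toList) value.toList =
        leftShrinkGoB (PySem.Set.ofList (permitted.map String.toList)) value.toList
          (PySem.Chars.splitOn value.toList [':']) 0 (PySem.Chars.splitOn value.toList [':']) := by
      have hmem : ∀ x, (PySem.Set.ofList (permitted.map String.toList)).contains x = true ↔
          x ∈ permitted.map String.toList := by
        intro x
        rw [PySem.Set.contains, List.contains_iff_mem]
        exact PySem.Set.mem_ofList _ x
      have hcf := pvSplitc_colonfree value.toList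
      set l := value.toList with hl
      have hsp : pvSplitc l = l.takeWhile (· ≠ ':') :: pvSplitc ((l.dropWhile (· ≠ ':')).tail) :=
        pvSplitc_cons_of_mem l hmemv
      have hsplit : PySem.Chars.splitOnMax l [':'] 1 =
          [l.takeWhile (· ≠ ':'), (l.dropWhile (· ≠ ':')).tail] := by
        rw [pv_splitOnMax1, if_pos hmemv]
        rfl
      rw [pv_splitOn_eq, hsp, leftShrinkGoA, hsplit, pv_goB_cons]
      simp only [List.headD_cons]
      by_cases hP : PySem.Chars.lower (PySem.Chars.strip (l.takeWhile (· ≠ ':'))) ∈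
          permitted.map String.toList
      · have hc : (PySem.Set.ofList (permitted.map String.toList)).contains
            (PySem.Chars.lower (PySem.Chars.strip (l.takeWhile (· ≠ ':')))) = true := (hmem _).mpr hP
        rw [if_pos hP, hc, if_pos rfl]
        simp
      · have hc : (PySem.Set.ofList (permitted.map String.toList)).contains
            (PySem.Chars.lower (PySem.Chars.strip (l.takeWhile (· ≠ ':')))) = false := by
          cases hh : (PySem.Set.ofList (permitted.map String.toList)).contains
              (PySem.Chars.lower (PySem.Chars.strip (l.takeWhile (· ≠ ':')))) with
          | false => rfl
          | true => exact absurd ((hmem _).mp hh) hP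
        have hisInV : ¬ (PySem.Chars.isIn [':'] l = false) := by
          rw [(pv_isIn_colon _).mpr hmemv]; simp
        rw [if_neg hP, dif_neg hisInV, hc]
        simp only [Bool.false_eq_true, if_false, List.getLastD_cons, List.getLastD_nil]
        have hjoin : PySem.Chars.join [':'] (pvSplitc ((l.dropWhile (· ≠ ':')).tail)) =
            (l.dropWhile (· ≠ ':')).tail := pv_join_splitc _
        conv_lhs => rw [← hjoin]
        exact pv_loop_main _ _ _ _ (hsp ▸ hcf) hmem (pvSplitc ((l.dropWhile (· ≠ ':')).tail)) 1
          rfl (pvSplitc_ne_nil _) (by omega)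
    rw [hgo]

-- ===== VERDICT (by name: the statement is the Claim_ definition above) =====
theorem left_shrink_spec : Claim_equal_left_shrink := by
  intro value permitted _
  unfold Spec_left_shrink
  exact pv_main value permitted
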